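-- pv_equiv track=rewrite | github.com/annieLognCoding/ACSL | HW_ACSL/0428/2048.py | move_and_merge_until_stable
-- ===== SOURCE A (Python) =====
-- def move_and_merge_until_stable(row):
--     # Remove zeros and prepare for merging
--     row = [i for i in row if i != 0]
--     can_merge = True
--
--     # Continue merging until no further merges can be done
--     while can_merge:
--         new_row = []
--         skip = False
--         can_merge = False  # Reset merge possibility
--         for i in range(len(row)):
--             if skip:
--                 skip = False
--                 continue
--
--             # Check for possible merge
--             if i + 1 < len(row) and row[i] == row[i + 1]:
--                 new_row.append(row[i] * 2)
--                 skip = True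
--                 can_merge = True  # Continue merging since a merge was made
--             else:
--                 new_row.append(row[i])
--
--         row = new_row
--
--     # Fill the remaining spaces with zeros
--     row.extend([0] * (4 - len(row)))  # Assuming a standard 2048 grid size of 4x4
--     return row
-- ===== SOURCE B (Python) =====
-- def one_round(tiles):
--     # run-length pass: a maximal run of k equal tiles becomes k//2 doubled tiles
--     # followed by the leftover tile when k is odd
--     out = []
--     n = len(tiles)
--     i = 0
--     while i < n:
--         j = i
--         while j < n and tiles[j] == tiles[i]:
--             j += 1
--         k = j - i
--         out += [tiles[i] * 2] * (k // 2)
--         if k % 2 == 1: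
--             out.append(tiles[i])
--         i = j
--     return out
--
--
-- def move_and_merge_until_stable(row):
--     cur = [x for x in row if x != 0]
--     nxt = one_round(cur)
--     while len(nxt) != len(cur):
--         cur, nxt = nxt, one_round(nxt)
--     return nxt + [0] * (4 - len(nxt))
-- ===== Notes on version B (the rewrite author's own statement) =====
-- stated objective: alternative
-- what changed: Each merge round is computed by run-length grouping (a maximal run of k equal tiles emits k//2 doubled tiles plus the odd leftover) instead of an index loop with skip/can_merge flags, and stability is detected by comparing lengths between rounds.
import Mathlib
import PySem

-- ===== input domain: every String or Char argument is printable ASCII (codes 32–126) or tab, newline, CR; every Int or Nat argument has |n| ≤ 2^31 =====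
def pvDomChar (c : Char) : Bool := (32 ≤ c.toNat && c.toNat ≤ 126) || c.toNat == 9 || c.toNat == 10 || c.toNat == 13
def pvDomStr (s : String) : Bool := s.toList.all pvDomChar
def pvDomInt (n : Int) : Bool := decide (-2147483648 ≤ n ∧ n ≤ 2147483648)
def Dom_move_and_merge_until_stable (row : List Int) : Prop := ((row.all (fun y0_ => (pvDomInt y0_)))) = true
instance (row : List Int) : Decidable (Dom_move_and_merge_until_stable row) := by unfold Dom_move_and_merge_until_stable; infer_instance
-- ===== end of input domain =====

-- B replaces A's per-round index loop with skip/can_merge flags by a run-length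
-- grouping round and a length comparison between rounds (objective: alternative).

-- ===== PORT A =====
-- A's inner for-loop over range(len(row)) with the skip flag, transcribed as the
-- obvious structural recursion over the same list; .2 is the can_merge flag.
def passA : List Int → List Int × Bool
  | [] => ([], false)
  | [a] => ([a], false)
  | a :: b :: t =>
    if a = b then
      ((a * 2) :: (passA t).1, true)
    else
      (a :: (passA (b :: t)).1, (passA (b :: t)).2)

-- termination lemmas the port's while-loop cites in decreasing_by
theorem passA_len_le (l : List Int) : (passA l).1.length ≤ l.length := by
  fun_induction passA l
  next => simp
  next a => simp
  next a t ih => simp at ih ⊢; omega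
  next b t hab ih => simp only [List.length_cons] at ih ⊢; simp; omega

theorem passA_snd_true_length (l : List Int) (h : (passA l).2 = true) :
    (passA l).1.length < l.length := by
  fun_induction passA l
  next => simp at h
  next a => simp at h
  next a t ih =>
    have := passA_len_le t
    simp at this ⊢; omega
  next b t hab ih =>
    simp at h ⊢
    have := ih h
    simp only [List.length_cons] at this
    omega

-- the `while can_merge` loop of A
def loopA (l : List Int) : List Int :=
  if h : (passA l).2 = true then loopA (passA l).1 else (passA l).1
termination_by l.length
decreasing_by exact passA_snd_true_length l h

def move_and_merge_until_stable (row : List Int) : List Int :=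
  let r := loopA (row.filter (fun i => i != 0))
  r ++ List.replicate (4 - r.length) 0

-- ===== PORT B =====
-- the inner `while j < n and tiles[j] == tiles[i]` scan of Source B: length of the
-- run of a at the front of the list
def takeRun (a : Int) : List Int → Nat
  | [] => 0
  | b :: t => if b = a then 1 + takeRun a t else 0

theorem takeRun_le (a : Int) (t : List Int) : takeRun a t ≤ t.length := by
  induction t with
  | nil => simp [takeRun]
  | cons b s ih => by_cases hb : b = a <;> simp [takeRun, hb] <;> omega

-- one_round of Source B: each maximal run of k equal tiles emits k/2 doubled tiles
-- then the leftover tile when k is odd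
def runPass : List Int → List Int
  | [] => []
  | a :: t =>
    List.replicate ((takeRun a t + 1) / 2) (a * 2) ++
      (if (takeRun a t + 1) % 2 = 1 then [a] else []) ++
      runPass (t.drop (takeRun a t))
termination_by l => l.length
decreasing_by
  simp only [List.length_drop, List.length_cons]
  omega

-- unfolding equations and the length bound B's loop cites in decreasing_by
theorem runPass_nil : runPass [] = [] := by unfold runPass; rfl

theorem runPass_cons (a : Int) (t : List Int) : runPass (a :: t) =
    List.replicate ((takeRun a t + 1) / 2) (a * 2) ++
      (if (takeRun a t + 1) % 2 = 1 then [a] else []) ++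
      runPass (t.drop (takeRun a t)) := by
  conv_lhs => unfold runPass

theorem runPass_len_le (l : List Int) : (runPass l).length ≤ l.length := by
  match l with
  | [] => simp [runPass_nil]
  | a :: t =>
    have ih := runPass_len_le (t.drop (takeRun a t))
    have h1 := takeRun_le a t
    rw [runPass_cons]
    simp only [List.length_append, List.length_replicate, List.length_drop,
      List.length_cons] at ih ⊢
    split <;> simp <;> omega
termination_by l.length
decreasing_by simp only [List.length_drop, List.length_cons]; omega

-- the `while len(nxt) != len(cur)` loop of Source B
def loopB (l : List Int) : List Int :=
  if h : (runPass l).length ≠ l.length then loopB (runPass l) else runPass l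
termination_by l.length
decreasing_by exact lt_of_le_of_ne (runPass_len_le l) h

def move_and_merge_until_stable_alt (row : List Int) : List Int :=
  let r := loopB (row.filter (fun i => i != 0))
  r ++ List.replicate (4 - r.length) 0

-- ===== PRECONDITION & SPEC =====
def Spec_move_and_merge_until_stable (row : List Int) (out : List Int) : Prop := out = move_and_merge_until_stable_alt row
instance (row : List Int) (out : List Int) : Decidable (Spec_move_and_merge_until_stable row out) := by unfold Spec_move_and_merge_until_stable; infer_instance

-- ===== CLAIM (what is proved, stated in full; the proofs are below) =====
def Claim_equal_move_and_merge_until_stable : Prop := ∀ (row : List Int), Dom_move_and_merge_until_stable row → Spec_move_and_merge_until_stable row (move_and_merge_until_stable row)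

-- ===== LEMMAS AND PROOFS =====

theorem takeRun_cons_self (a : Int) (t : List Int) :
    takeRun a (a :: t) = 1 + takeRun a t := by simp [takeRun]

theorem takeRun_cons_ne (a b : Int) (t : List Int) (h : ¬ b = a) :
    takeRun a (b :: t) = 0 := by simp [takeRun, h]

theorem runPass_singleton (a : Int) : runPass [a] = [a] := by
  rw [runPass_cons]
  simp [takeRun, runPass_nil]

theorem runPass_cons_ne (a b : Int) (t : List Int) (hab : ¬ a = b) :
    runPass (a :: b :: t) = a :: runPass (b :: t) := by
  rw [runPass_cons, takeRun_cons_ne a b t (fun h => hab h.symm)]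
  simp

theorem runPass_cons_eq (a : Int) (t : List Int) :
    runPass (a :: a :: t) = (a * 2) :: runPass t := by
  rw [runPass_cons, takeRun_cons_self]
  match t with
  | [] =>
    simp [takeRun, runPass_nil]
  | b :: s =>
    by_cases hb : b = a
    · subst hb
      conv_rhs => rw [runPass_cons]
      rw [takeRun_cons_self]
      have h3 : (1 + (1 + takeRun b s) + 1) / 2 = (takeRun b s + 1) / 2 + 1 := by omega
      have h4 : (1 + (1 + takeRun b s) + 1) % 2 = (takeRun b s + 1) % 2 := by omega
      have h5 : (b :: b :: s).drop (1 + (1 + takeRun b s)) = s.drop (takeRun b s) := by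
        rw [show 1 + (1 + takeRun b s) = takeRun b s + 1 + 1 from by omega]
        simp [List.drop_succ_cons]
      rw [h3, h4, h5]
      simp [List.replicate_succ]
    · rw [takeRun_cons_ne a b s hb]
      simp

theorem passA_fst_eq_runPass (l : List Int) : (passA l).1 = runPass l := by
  fun_induction passA l
  next => simp [runPass_nil]
  next a => simp [runPass_singleton]
  next a t ih => simp [runPass_cons_eq, ih]
  next b t hab ih =>
    rename_i a
    simp [runPass_cons_ne a b t hab, ih]

theorem passA_snd_false_fst (l : List Int) (h : (passA l).2 = false) :
    (passA l).1 = l := by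
  fun_induction passA l
  next => simp
  next a => simp
  next a t ih => simp at h
  next b t hab ih =>
    simp at h ⊢
    exact ih h

theorem loopA_unfold (l : List Int) :
    loopA l = if (passA l).2 = true then loopA (passA l).1 else (passA l).1 := by
  conv_lhs => unfold loopA
  simp

theorem loopB_unfold (l : List Int) :
    loopB l = if (runPass l).length ≠ l.length then loopB (runPass l) else runPass l := by
  conv_lhs => unfold loopB
  simp

theorem loopA_eq_loopB (l : List Int) : loopA l = loopB l := by
  rw [loopA_unfold, loopB_unfold]
  by_cases h : (passA l).2 = true
  · have hlt := passA_snd_true_length l h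
    rw [passA_fst_eq_runPass l] at hlt
    have hne : (runPass l).length ≠ l.length := Nat.ne_of_lt hlt
    rw [if_pos h, if_pos hne, passA_fst_eq_runPass l]
    exact loopA_eq_loopB (runPass l)
  · have hfst : runPass l = l := by
      rw [← passA_fst_eq_runPass l]
      exact passA_snd_false_fst l (by simpa using h)
    have heq : ¬ (runPass l).length ≠ l.length := by simp [hfst]
    rw [if_neg h, if_neg heq, passA_fst_eq_runPass l]
termination_by l.length
decreasing_by exact lt_of_le_of_ne (runPass_len_le l) hne

-- ===== VERDICT (by name: the statement is the Claim_ definition above) =====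
theorem move_and_merge_until_stable_spec : Claim_equal_move_and_merge_until_stable := by
  intro row _
  unfold Spec_move_and_merge_until_stable move_and_merge_until_stable move_and_merge_until_stable_alt
  simp only [loopA_eq_loopB]
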